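-- pv_equiv track=rewrite | github.com/mpat247/TransMAR-GAN | scripts/figure_generation/figure4_multiscale_discriminator.py | compute_receptive_field
-- ===== SOURCE A (Python) =====
-- def compute_receptive_field(num_layers=5):
--     """
--     Compute the receptive field size for the discriminator.
--
--     For conv with kernel k, stride s:
--     RF_new = RF_old + (k - 1) * product_of_previous_strides
--
--     Returns receptive field in pixels.
--     """
--     rf = 1  # Start with 1 pixel
--     stride_product = 1
--
--     for i in range(num_layers):
--         k = 4  # kernel size
--         stride = 1 if i == num_layers - 1 else 2
--
--         rf = rf + (k - 1) * stride_product
--         stride_product *= stride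
--
--     # Add one more for the final 1x1 conv
--     rf = rf + (1 - 1) * stride_product  # 1x1 conv doesn't change RF
--
--     return rf
-- ===== SOURCE B (Python) =====
-- def compute_receptive_field(num_layers=5):
--     """Closed form: each of the num_layers conv layers adds 3 * 2**i to the
--     receptive field (the last layer's stride of 1 never affects rf), so
--     rf = 1 + 3 * (2**num_layers - 1); an empty layer stack gives 1."""
--     if num_layers <= 0:
--         return 1
--     return 1 + 3 * (2 ** num_layers - 1)
-- ===== Notes on version B (the rewrite author's own statement) =====
-- stated objective: simpler
-- what changed: Replaces the per-layer loop that tracks rf and stride_product with the closed form 1 + 3*(2**num_layers - 1) from the geometric series, with non-positive num_layers behaving like the empty range.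
import Mathlib
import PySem

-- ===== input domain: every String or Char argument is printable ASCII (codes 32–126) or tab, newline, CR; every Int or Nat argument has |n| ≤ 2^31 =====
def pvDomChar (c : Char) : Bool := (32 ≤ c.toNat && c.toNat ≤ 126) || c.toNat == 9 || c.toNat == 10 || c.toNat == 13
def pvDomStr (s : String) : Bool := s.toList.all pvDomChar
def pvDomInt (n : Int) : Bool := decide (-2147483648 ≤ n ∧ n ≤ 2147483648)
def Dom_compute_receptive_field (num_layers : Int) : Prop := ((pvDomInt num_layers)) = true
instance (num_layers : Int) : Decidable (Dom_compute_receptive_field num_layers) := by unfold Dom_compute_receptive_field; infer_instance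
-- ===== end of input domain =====

-- B replaces the per-layer loop with the closed form 1 + 3*(2^num_layers - 1) (simpler).


-- ===== PORT A =====
def compute_receptive_field (num_layers : Int) : Int :=
  let st := (PySem.List.pyRange 0 num_layers 1).foldl
    (fun (s : Int × Int) i =>
      let k : Int := 4
      let stride : Int := if i = num_layers - 1 then 1 else 2
      (s.1 + (k - 1) * s.2, s.2 * stride)) (1, 1)
  st.1 + (1 - 1) * st.2

-- ===== PORT B =====
def compute_receptive_field_alt (num_layers : Int) : Int :=
  if num_layers ≤ 0 then 1 else 1 + 3 * (2 ^ num_layers.toNat - 1)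

-- ===== PRECONDITION & SPEC =====
def Spec_compute_receptive_field (num_layers : Int) (out : Int) : Prop := out = compute_receptive_field_alt num_layers
instance (num_layers : Int) (out : Int) : Decidable (Spec_compute_receptive_field num_layers out) := by unfold Spec_compute_receptive_field; infer_instance

-- ===== CLAIM (what is proved, stated in full; the proofs are below) =====
def Claim_equal_compute_receptive_field : Prop := ∀ (num_layers : Int), Dom_compute_receptive_field num_layers → Spec_compute_receptive_field num_layers (compute_receptive_field num_layers)

-- ===== LEMMAS AND PROOFS =====

-- loop invariant: after processing the first m layers (m ≤ num_layers),
-- rf = 1 + 3*(2^m - 1) and stride_product = 2^(min m (num_layers-1))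
theorem crf_fold_inv (n : Int) (hn : 0 < n) (m : Nat) (hm : m ≤ n.toNat) :
    (PySem.List.pyRange 0 (m : Int) 1).foldl
      (fun (s : Int × Int) i =>
        let k : Int := 4
        let stride : Int := if i = n - 1 then 1 else 2
        (s.1 + (k - 1) * s.2, s.2 * stride)) (1, 1)
    = (1 + 3 * (2 ^ m - 1), 2 ^ (min m (n.toNat - 1))) := by
  induction m with
  | zero => simp [PySem.List.pyRange_zero_nat]
  | succ m ih =>
    have hm' : m ≤ n.toNat := Nat.le_of_succ_le hm
    have hcast : ((m + 1 : Nat) : Int) = (m : Int) + 1 := by push_cast; ring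
    rw [hcast, PySem.List.pyRange_one_succ_right (by positivity), List.foldl_append, ih hm']
    have hmin : min m (n.toNat - 1) = m := by omega
    by_cases hlast : (m : Int) = n - 1
    · have h1 : m = n.toNat - 1 := by omega
      simp [h1]
      omega
    · have h2 : min (m + 1) (n.toNat - 1) = m + 1 := by
        have : (m : Int) ≠ n - 1 := hlast
        omega
      simp [hlast, hmin, h2]
      constructor
      · ring
      · ring

-- ===== VERDICT (by name: the statement is the Claim_ definition above) =====
theorem compute_receptive_field_spec : Claim_equal_compute_receptive_field := by
  intro n _
  unfold Spec_compute_receptive_field compute_receptive_field compute_receptive_field_alt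
  by_cases hn : n ≤ 0
  · have he : PySem.List.pyRange 0 n 1 = [] := by
      rw [PySem.List.pyRange_one, show (n - 0).toNat = 0 by omega]
      simp
    rw [if_pos hn]
    simp [he]
  · have hn' : 0 < n := by omega
    have hcn : ((n.toNat : Nat) : Int) = n := Int.toNat_of_nonneg (by omega)
    rw [show PySem.List.pyRange 0 n 1 = PySem.List.pyRange 0 ((n.toNat : Nat) : Int) 1 by rw [hcn]]
    rw [crf_fold_inv n hn' n.toNat (by omega)]
    simp [hn]
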